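-- pv_equiv track=rewrite | github.com/raeez/chiral-bar-cobar | compute/lib/bar_ext_groups_modules_engine.py | _colored_partition_count
-- ===== SOURCE A (Python) =====
-- def _colored_partition_count(h: int, n_colors: int = 3) -> int:
--     """Number of n_colors-colored partitions of h."""
--     if h < 0:
--         return 0
--     if h == 0:
--         return 1
--     coeffs = [0] * (h + 1)
--     coeffs[0] = 1
--     for n in range(1, h + 1):
--         for _ in range(n_colors):
--             for j_idx in range(n, h + 1):
--                 coeffs[j_idx] += coeffs[j_idx - n]
--     return coeffs[h]
-- ===== SOURCE B (Python) =====
-- def _colored_partition_count(h: int, n_colors: int = 3) -> int: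
--     """Number of n_colors-colored partitions of h."""
--     if h < 0:
--         return 0
--     if h == 0:
--         return 1
--     if n_colors <= 0:
--         return 0  # with no colors only the empty partition exists
--     p = [1] + [0] * h
--     for n in range(1, h + 1):
--         # coefficients of (1 - x^n)^(-n_colors): C(n_colors - 1 + i, i) at x^(i*n)
--         weights = [1]
--         w = 1
--         for i in range(1, h // n + 1):
--             w = w * (n_colors - 1 + i) // i
--             weights.append(w)
--         p = [sum(weights[i] * p[j - i * n] for i in range(j // n + 1))
--              for j in range(h + 1)]
--     return p[h]
-- ===== Notes on version B (the rewrite author's own statement) =====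
-- stated objective: faster
-- what changed: A applies the shift-add operator 1/(1-x^n) n_colors separate times per part size n; B expands each Euler factor (1-x^n)^(-n_colors) once into binomial weights C(n_colors-1+i,i) built incrementally and does a single weighted convolution per part size, so the loop count no longer depends on n_colors.
import Mathlib
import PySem

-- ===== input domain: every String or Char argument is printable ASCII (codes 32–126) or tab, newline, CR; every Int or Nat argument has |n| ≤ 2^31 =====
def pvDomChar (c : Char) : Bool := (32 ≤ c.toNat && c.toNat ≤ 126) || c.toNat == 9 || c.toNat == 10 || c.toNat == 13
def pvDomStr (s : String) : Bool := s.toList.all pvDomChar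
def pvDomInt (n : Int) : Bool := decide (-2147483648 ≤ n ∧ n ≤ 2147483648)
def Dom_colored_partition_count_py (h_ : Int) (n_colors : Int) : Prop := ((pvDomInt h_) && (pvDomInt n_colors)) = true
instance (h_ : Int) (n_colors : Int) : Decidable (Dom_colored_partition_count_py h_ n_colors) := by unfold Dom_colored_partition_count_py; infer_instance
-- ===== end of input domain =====

-- B expands each Euler factor (1-x^n)^(-n_colors) once as a binomially-weighted convolution instead of
-- applying n_colors shift-add passes per part size, making the work independent of n_colors (objective: faster for large n_colors).


-- ===== PORT A =====
-- one in-place pass 'for j_idx in range(n, h+1): coeffs[j_idx] += coeffs[j_idx - n]'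
-- (all indices are provably nonnegative and in range, so pyGetD / .set with .toNat are exact here)
def pvPassA (n h_ : Int) (cs : List Int) : List Int :=
  (PySem.List.pyRange n (h_ + 1) 1).foldl
    (fun cs j => cs.set j.toNat (PySem.List.pyGetD cs j 0 + PySem.List.pyGetD cs (j - n) 0)) cs

def colored_partition_count_py (h_ : Int) (n_colors : Int) : Int :=
  if h_ < 0 then 0
  else if h_ = 0 then 1
  else
    let coeffs : List Int := (List.replicate (h_ + 1).toNat 0).set 0 1
    let final := (PySem.List.pyRange 1 (h_ + 1) 1).foldl
      (fun cs n => (PySem.List.pyRange 0 n_colors 1).foldl (fun cs _ => pvPassA n h_ cs) cs)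
      coeffs
    PySem.List.pyGetD final h_ 0

-- ===== PORT B =====
-- weights[i] = C(n_colors-1+i, i), built incrementally: w = w * (n_colors - 1 + i) // i
def pvWeights (c n h_ : Int) : List Int :=
  ((PySem.List.pyRange 1 (PySem.Int.floordiv h_ n + 1) 1).foldl
    (fun (st : List Int × Int) i =>
      let w' := PySem.Int.floordiv (st.2 * (c - 1 + i)) i
      (st.1 ++ [w'], w')) ([1], 1)).1

-- sum(weights[i] * p[j - i*n] for i in range(j//n + 1))
def pvConv (n : Int) (ws p : List Int) (j : Int) : Int :=
  ((PySem.List.pyRange 0 (PySem.Int.floordiv j n + 1) 1).map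
    (fun i => PySem.List.pyGetD ws i 0 * PySem.List.pyGetD p (j - i * n) 0)).sum

def colored_partition_count_py_alt (h_ : Int) (n_colors : Int) : Int :=
  if h_ < 0 then 0
  else if h_ = 0 then 1
  else if n_colors ≤ 0 then 0
  else
    let p0 : List Int := 1 :: List.replicate h_.toNat 0
    let pf := (PySem.List.pyRange 1 (h_ + 1) 1).foldl
      (fun p n =>
        let ws := pvWeights n_colors n h_
        (PySem.List.pyRange 0 (h_ + 1) 1).map (fun j => pvConv n ws p j))
      p0
    PySem.List.pyGetD pf h_ 0

-- ===== PRECONDITION & SPEC =====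
def Spec_colored_partition_count_py (h_ : Int) (n_colors : Int) (out : Int) : Prop := out = colored_partition_count_py_alt h_ n_colors
instance (h_ : Int) (n_colors : Int) (out : Int) : Decidable (Spec_colored_partition_count_py h_ n_colors out) := by unfold Spec_colored_partition_count_py; infer_instance

-- ===== CLAIM (what is proved, stated in full; the proofs are below) =====
def Claim_equal_colored_partition_count_py : Prop := ∀ (h_ : Int) (n_colors : Int), Dom_colored_partition_count_py h_ n_colors → Spec_colored_partition_count_py h_ n_colors (colored_partition_count_py h_ n_colors)

-- ===== LEMMAS AND PROOFS =====

-- value of entry j of a list under Python indexing (all indices used below are nonnegative)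
def pvGet (xs : List Int) (j : Nat) : Int := PySem.List.pyGetD xs (j : Int) 0

-- mathematical model of one shift-add pass of A at part size n
def pvOnePass (n : Nat) (f : Nat → Int) (j : Nat) : Int :=
  if _h : 0 < n ∧ n ≤ j then f j + pvOnePass n f (j - n) else f j
termination_by j
decreasing_by omega

-- mathematical model of B's binomial convolution at part size n with c colors
def pvBStep (c n : Nat) (f : Nat → Int) (j : Nat) : Int :=
  ∑ i ∈ Finset.range (j / n + 1), (((c - 1 + i).choose i : Nat) : Int) * f (j - i * n)

theorem pvOnePass_congr {n : Nat} {f g : Nat → Int} {j : Nat}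
    (h : ∀ i ≤ j, f i = g i) : pvOnePass n f j = pvOnePass n g j := by
  induction j using Nat.strong_induction_on with
  | _ j ih =>
    conv_lhs => rw [pvOnePass]
    conv_rhs => rw [pvOnePass]
    split_ifs with hc
    · rw [h j le_rfl, ih (j - n) (by omega) (fun i hi => h i (by omega))]
    · exact h j le_rfl

theorem pvBStep_congr {c n : Nat} {f g : Nat → Int} {j : Nat}
    (h : ∀ i ≤ j, f i = g i) : pvBStep c n f j = pvBStep c n g j := by
  unfold pvBStep
  exact Finset.sum_congr rfl fun i _ => by rw [h (j - i * n) (by omega)]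

theorem pv_div_sub {n j : Nat} (hn : 0 < n) (hj : n ≤ j) : (j - n) / n + 1 = j / n := by
  conv_rhs => rw [← Nat.sub_add_cancel hj]
  rw [Nat.add_div_right _ hn]

theorem pvOnePass_eq_sum {n : Nat} (hn : 0 < n) (f : Nat → Int) (j : Nat) :
    pvOnePass n f j = ∑ i ∈ Finset.range (j / n + 1), f (j - i * n) := by
  induction j using Nat.strong_induction_on with
  | _ j ih =>
    rw [pvOnePass]
    split_ifs with hc
    · rw [ih (j - n) (by omega)]
      have hdiv : (j - n) / n + 1 = j / n := pv_div_sub hn hc.2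
      rw [← hdiv, Finset.sum_range_succ' (fun i => f (j - i * n)) ((j - n) / n + 1)]
      have heq : ∀ i : Nat, j - n - i * n = j - (i + 1) * n := fun i => by
        rw [Nat.sub_sub]; congr 1; ring
      simp only [heq, Nat.zero_mul, Nat.sub_zero]
      ring
    · have hj : j < n := by omega
      rw [Nat.div_eq_of_lt hj]
      simp

theorem pvOnePass_bstep {c n : Nat} (hn : 0 < n) (hc : 0 < c) (f : Nat → Int) (j : Nat) :
    pvOnePass n (pvBStep c n f) j = pvBStep (c + 1) n f j := by
  induction j using Nat.strong_induction_on with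
  | _ j ih =>
    rw [pvOnePass]
    split_ifs with hcc
    · rw [ih (j - n) (by omega)]
      unfold pvBStep
      have hdiv : (j - n) / n + 1 = j / n := pv_div_sub hn hcc.2
      rw [← hdiv,
          Finset.sum_range_succ' (fun i => (((c - 1 + i).choose i : Nat) : Int) * f (j - i * n)) ((j - n) / n + 1),
          Finset.sum_range_succ' (fun i => (((c + 1 - 1 + i).choose i : Nat) : Int) * f (j - i * n)) ((j - n) / n + 1)]
      have heq : ∀ i : Nat, j - n - i * n = j - (i + 1) * n := fun i => by
        rw [Nat.sub_sub]; congr 1; ring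
      simp only [heq, Nat.zero_mul, Nat.sub_zero, Nat.choose_zero_right]
      rw [add_right_comm, ← Finset.sum_add_distrib]
      have hterm : ∀ i : Nat,
          (((c - 1 + (i + 1)).choose (i + 1) : Nat) : Int) * f (j - (i + 1) * n)
            + (((c + 1 - 1 + i).choose i : Nat) : Int) * f (j - (i + 1) * n)
          = (((c + 1 - 1 + (i + 1)).choose (i + 1) : Nat) : Int) * f (j - (i + 1) * n) := by
        intro i
        have h1 : c - 1 + (i + 1) = c + i := by omega
        have h2 : c + 1 - 1 + i = c + i := by omega
        have h3 : c + 1 - 1 + (i + 1) = c + i + 1 := by omega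
        rw [h1, h2, h3, Nat.choose_succ_succ (c + i) i]
        push_cast
        ring
      simp only [hterm]
    · have hj : j < n := by omega
      unfold pvBStep
      rw [Nat.div_eq_of_lt hj]
      simp

theorem pvIterate_eq_bstep {c n : Nat} (hn : 0 < n) (hc : 0 < c) (f : Nat → Int) :
    (pvOnePass n)^[c] f = pvBStep c n f := by
  induction c with
  | zero => omega
  | succ c ihc =>
    rcases Nat.eq_zero_or_pos c with hc0 | hcpos
    · subst hc0
      funext j
      rw [Function.iterate_one, pvOnePass_eq_sum hn]
      unfold pvBStep
      exact Finset.sum_congr rfl fun i _ => by simp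
    · rw [Function.iterate_succ_apply', ihc hcpos]
      funext j
      exact pvOnePass_bstep hn hcpos f j

theorem pvGet_set_self (l : List Int) (i : Nat) (a : Int) (h : i < l.length) :
    pvGet (l.set i a) i = a := by
  unfold pvGet
  rw [PySem.List.pyGetD_natCast, List.getD_eq_getElem?_getD, List.getElem?_set_self]
  · rfl
  · exact h

theorem pvGet_set_ne (l : List Int) (i j : Nat) (a : Int) (h : i ≠ j) :
    pvGet (l.set i a) j = pvGet l j := by
  unfold pvGet
  rw [PySem.List.pyGetD_natCast, PySem.List.pyGetD_natCast,
      List.getD_eq_getElem?_getD, List.getD_eq_getElem?_getD, List.getElem?_set_ne h]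

theorem pv_foldl_set_length (l : List Int) (cs : List Int)
    (F : List Int → Int → Nat) (V : List Int → Int → Int) :
    (l.foldl (fun cs j => cs.set (F cs j) (V cs j)) cs).length = cs.length := by
  induction l generalizing cs with
  | nil => rfl
  | cons x t ih => simp only [List.foldl_cons]; rw [ih]; exact List.length_set ..

theorem pv_foldl_const_iterate {α : Type} (l : List Int) (f : α → α) (init : α) :
    (l.foldl (fun s _ => f s) init) = f^[l.length] init := by
  induction l generalizing init with
  | nil => rfl
  | cons x t ih => simp only [List.foldl_cons, List.length_cons, ih, Function.iterate_succ_apply]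

theorem pvPassA_fold_get (n h m : Nat) (hn : 0 < n) (cs : List Int) (hcs : cs.length = h + 1)
    (hm : n + m ≤ h + 1) :
    (∀ j, pvGet ((PySem.List.pyRange (n : Int) ((n : Int) + (m : Int)) 1).foldl
        (fun cs j => cs.set j.toNat (PySem.List.pyGetD cs j 0 + PySem.List.pyGetD cs (j - (n : Int)) 0)) cs) j
      = if n ≤ j ∧ j < n + m then pvOnePass n (pvGet cs) j else pvGet cs j) := by
  induction m with
  | zero =>
    rw [PySem.List.pyRange_one_eq_nil (by push_cast; omega)]
    intro j
    rw [if_neg (by omega)]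
    rfl
  | succ m ih =>
    have hrange : PySem.List.pyRange (n : Int) ((n : Int) + ((m + 1 : Nat) : Int)) 1
        = PySem.List.pyRange (n : Int) ((n : Int) + (m : Int)) 1 ++ [((n + m : Nat) : Int)] := by
      have : ((n : Int) + ((m + 1 : Nat) : Int)) = ((n : Int) + (m : Int)) + 1 := by push_cast; ring
      rw [this, PySem.List.pyRange_one_succ_right (by omega)]
      norm_num
    rw [hrange, List.foldl_append]
    set Fm := (PySem.List.pyRange (n : Int) ((n : Int) + (m : Int)) 1).foldl
        (fun cs j => cs.set j.toNat (PySem.List.pyGetD cs j 0 + PySem.List.pyGetD cs (j - (n : Int)) 0)) cs with hFm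
    have hlen : Fm.length = h + 1 := by
      rw [hFm, pv_foldl_set_length _ _ (fun _ j => j.toNat)
        (fun cs j => PySem.List.pyGetD cs j 0 + PySem.List.pyGetD cs (j - (n : Int)) 0), hcs]
    have ihm := ih (by omega)
    simp only [List.foldl_cons, List.foldl_nil]
    have htn : ((n + m : Nat) : Int).toNat = n + m := by push_cast; omega
    have hv1 : PySem.List.pyGetD Fm ((n + m : Nat) : Int) 0 = pvGet Fm (n + m) := rfl
    have hv2 : PySem.List.pyGetD Fm (((n + m : Nat) : Int) - (n : Int)) 0 = pvGet Fm m := by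
      have : (((n + m : Nat) : Int) - (n : Int)) = ((m : Nat) : Int) := by push_cast; ring_nf
      rw [this]; rfl
    rw [htn, hv1, hv2]
    intro j
    by_cases hj : j = n + m
    · subst hj
      rw [pvGet_set_self _ _ _ (by omega), if_pos (by omega)]
      rw [ihm (n + m), if_neg (by omega), ihm m]
      conv_rhs => rw [pvOnePass]
      rw [dif_pos ⟨hn, by omega⟩]
      have : n + m - n = m := by omega
      rw [this]
      by_cases hm2 : n ≤ m
      · rw [if_pos ⟨hm2, by omega⟩]
      · rw [if_neg (by omega)]
        conv_rhs => rw [pvOnePass]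
        rw [dif_neg (by omega)]
    · rw [pvGet_set_ne _ _ _ _ (by omega), ihm j]
      by_cases hj2 : n ≤ j ∧ j < n + m
      · rw [if_pos hj2, if_pos ⟨hj2.1, by omega⟩]
      · rw [if_neg hj2, if_neg (by omega)]

theorem pvPassA_length (n h_ : Int) (cs : List Int) : (pvPassA n h_ cs).length = cs.length := by
  unfold pvPassA
  exact pv_foldl_set_length _ _ (fun _ j => j.toNat)
    (fun cs j => PySem.List.pyGetD cs j 0 + PySem.List.pyGetD cs (j - n) 0)

theorem pvPassA_get_le (n h : Nat) (hn : 0 < n) (cs : List Int) (hcs : cs.length = h + 1)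
    (j : Nat) (hj : j ≤ h) :
    pvGet (pvPassA (n : Int) (h : Int) cs) j = pvOnePass n (pvGet cs) j := by
  unfold pvPassA
  by_cases hnh : n ≤ h
  · have hcast : ((h : Int) + 1) = (n : Int) + ((h + 1 - n : Nat) : Int) := by omega
    rw [hcast, pvPassA_fold_get n h (h + 1 - n) hn cs hcs (by omega) j]
    by_cases hcond : n ≤ j ∧ j < n + (h + 1 - n)
    · rw [if_pos hcond]
    · rw [if_neg hcond]
      conv_rhs => rw [pvOnePass]
      rw [dif_neg (by omega)]
  · rw [PySem.List.pyRange_one_eq_nil (by omega), List.foldl_nil]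
    conv_rhs => rw [pvOnePass]
    rw [dif_neg (by omega)]

theorem pvPassA_iter (n h : Nat) (hn : 0 < n) (cs : List Int) (hcs : cs.length = h + 1) (k : Nat) :
    ((pvPassA (n : Int) (h : Int))^[k] cs).length = h + 1 ∧
    (∀ j ≤ h, pvGet ((pvPassA (n : Int) (h : Int))^[k] cs) j = (pvOnePass n)^[k] (pvGet cs) j) := by
  induction k with
  | zero => exact ⟨hcs, fun j _ => rfl⟩
  | succ k ih =>
    refine ⟨?_, ?_⟩
    · rw [Function.iterate_succ_apply', pvPassA_length, ih.1]
    · intro j hj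
      rw [Function.iterate_succ_apply', Function.iterate_succ_apply' (pvOnePass n)]
      rw [pvPassA_get_le n h hn _ ih.1 j hj]
      exact pvOnePass_congr (fun i hi => ih.2 i (by omega))

theorem pvWeights_fold (c : Nat) (hc : 0 < c) : ∀ m : Nat,
    (PySem.List.pyRange 1 ((m : Int) + 1) 1).foldl
      (fun (st : List Int × Int) i =>
        let w' := PySem.Int.floordiv (st.2 * ((c : Int) - 1 + i)) i
        (st.1 ++ [w'], w')) ([1], 1)
    = ((List.range (m + 1)).map (fun i => (((c - 1 + i).choose i : Nat) : Int)),
       (((c - 1 + m).choose m : Nat) : Int)) := by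
  intro m
  induction m with
  | zero =>
    rw [show ((0 : Nat) : Int) + 1 = 1 by norm_num, PySem.List.pyRange_one_eq_nil le_rfl]
    simp
  | succ m ih =>
    have hend : ((m + 1 : Nat) : Int) + 1 = ((m : Int) + 1) + 1 := by push_cast; ring
    rw [hend, PySem.List.pyRange_one_succ_right (by omega), List.foldl_append, ih]
    simp only [List.foldl_cons, List.foldl_nil]
    have harg : (c : Int) - 1 + ((m : Int) + 1) = ((c + m : Nat) : Int) := by
      have : ((c : Nat) : Int) ≥ 1 := by omega
      push_cast
      omega
    have hprod : (((c - 1 + m).choose m : Nat) : Int) * ((c + m : Nat) : Int)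
        = (((c + m).choose (m + 1) * (m + 1) : Nat) : Int) := by
      have hnat : (c - 1 + m).choose m * (c + m) = (c + m).choose (m + 1) * (m + 1) := by
        have hs := Nat.add_one_mul_choose_eq (c - 1 + m) m
        have h1 : c - 1 + m + 1 = c + m := by omega
        rw [h1] at hs
        simpa [Nat.mul_comm] using hs
      push_cast [← hnat]
      ring
    have hdivarg : ((m : Int) + 1) = ((m + 1 : Nat) : Int) := by push_cast; ring
    rw [harg, hprod, hdivarg, PySem.Int.floordiv_natCast,
        Nat.mul_div_cancel _ (by omega : 0 < m + 1)]
    have hw : (c + m).choose (m + 1) = (c - 1 + (m + 1)).choose (m + 1) := by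
      congr 1; omega
    rw [hw]
    rw [List.range_succ (n := m + 1), List.map_append]
    rfl

theorem pvWeights_spec (c n h : Nat) (hc : 0 < c) (_hn : 0 < n) :
    pvWeights (c : Int) (n : Int) (h : Int)
      = (List.range (h / n + 1)).map (fun i => (((c - 1 + i).choose i : Nat) : Int)) := by
  unfold pvWeights
  rw [PySem.Int.floordiv_natCast, pvWeights_fold c hc (h / n)]

theorem pvConv_eq (c n h : Nat) (hc : 0 < c) (hn : 0 < n) (p : List Int)
    (_hp : p.length = h + 1) (j : Nat) (hj : j ≤ h) :
    pvConv (n : Int) (pvWeights (c : Int) (n : Int) (h : Int)) p (j : Int)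
      = pvBStep c n (pvGet p) j := by
  unfold pvConv pvBStep
  rw [pvWeights_spec c n h hc hn, PySem.Int.floordiv_natCast,
      show ((j / n : Nat) : Int) + 1 = ((j / n + 1 : Nat) : Int) by push_cast; ring,
      PySem.List.pyRange_one, List.map_map]
  have htn : (((j / n + 1 : Nat) : Int) - 0).toNat = j / n + 1 := by
    rw [sub_zero, Int.toNat_natCast]
  rw [htn]
  rw [List.map_congr_left (f := _)
    (g := fun k : Nat => (((c - 1 + k).choose k : Nat) : Int) * pvGet p (j - k * n)) ?_]
  · rfl
  · intro k hk
    rw [List.mem_range] at hk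
    have hkn : k * n ≤ j := le_trans (Nat.mul_le_mul_right n (by omega : k ≤ j / n)) (Nat.div_mul_le_self j n)
    simp only [Function.comp_apply, zero_add]
    have hws : PySem.List.pyGetD
        ((List.range (h / n + 1)).map (fun i => (((c - 1 + i).choose i : Nat) : Int))) (k : Int) 0
        = (((c - 1 + k).choose k : Nat) : Int) := by
      rw [PySem.List.pyGetD_natCast, PySem.List.getD_map_range]
      have hdd : j / n ≤ h / n := Nat.div_le_div_right hj
      omega
    have hidx : ((j : Int) - (k : Int) * (n : Int)) = ((j - k * n : Nat) : Int) := by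
      rw [Nat.cast_sub hkn]; push_cast; ring
    rw [hws, hidx]
    rfl

theorem pvMapB_get (h : Nat) (g : Int → Int) (j : Nat) (hj : j ≤ h) :
    pvGet ((PySem.List.pyRange 0 ((h : Int) + 1) 1).map g) j = g (j : Int) := by
  unfold pvGet
  rw [show ((h : Int) + 1) = ((h + 1 : Nat) : Int) by push_cast; ring]
  exact PySem.List.pyGetD_map_pyRange g (h + 1) j 0 (by omega)

theorem pvMapB_length (h : Nat) (g : Int → Int) :
    ((PySem.List.pyRange 0 ((h : Int) + 1) 1).map g).length = h + 1 := by
  rw [List.length_map, PySem.List.length_pyRange_one]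
  omega

theorem pvOuter (h c : Nat) (hc : 0 < c) :
    ∀ (m a : Nat) (cs p : List Int), 0 < a → cs.length = h + 1 → p.length = h + 1 →
    (∀ j ≤ h, pvGet cs j = pvGet p j) →
    (∀ j ≤ h,
      pvGet ((PySem.List.pyRange (a : Int) ((a : Int) + (m : Int)) 1).foldl
        (fun cs n => (PySem.List.pyRange 0 (c : Int) 1).foldl (fun cs _ => pvPassA n (h : Int) cs) cs) cs) j
      = pvGet ((PySem.List.pyRange (a : Int) ((a : Int) + (m : Int)) 1).foldl
        (fun p n =>
          let ws := pvWeights (c : Int) n (h : Int)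
          (PySem.List.pyRange 0 ((h : Int) + 1) 1).map (fun j => pvConv n ws p j)) p) j) := by
  intro m
  induction m with
  | zero =>
    intro a cs p ha hcs hp hagree j hj
    rw [PySem.List.pyRange_one_eq_nil (a := (a : Int)) (b := (a : Int) + ((0 : Nat) : Int))
          (by omega),
        List.foldl_nil, List.foldl_nil]
    exact hagree j hj
  | succ m ih =>
    intro a cs p ha hcs hp hagree j hj
    rw [PySem.List.pyRange_one_cons (a := (a : Int)) (b := (a : Int) + ((m + 1 : Nat) : Int))
          (by push_cast; omega),
        List.foldl_cons, List.foldl_cons]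
    -- the A-state after the inner color loop at part size a
    have hInner : (PySem.List.pyRange 0 (c : Int) 1).foldl (fun cs _ => pvPassA (a : Int) (h : Int) cs) cs
        = (pvPassA (a : Int) (h : Int))^[c] cs := by
      rw [pv_foldl_const_iterate, PySem.List.length_pyRange_one]
      norm_num
    have hiter := pvPassA_iter a h ha cs hcs c
    have hlenB := pvMapB_length h (fun j => pvConv (a : Int) (pvWeights (c : Int) (a : Int) (h : Int)) p j)
    have hagree' : ∀ j ≤ h,
        pvGet ((pvPassA (a : Int) (h : Int))^[c] cs) j
        = pvGet ((PySem.List.pyRange 0 ((h : Int) + 1) 1).map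
            (fun j => pvConv (a : Int) (pvWeights (c : Int) (a : Int) (h : Int)) p j)) j := by
      intro j hj
      rw [hiter.2 j hj, pvIterate_eq_bstep ha hc,
          pvMapB_get h _ j hj, pvConv_eq c a h hc ha p hp j hj]
      exact pvBStep_congr (fun i hi => hagree i (by omega))
    have hrest : ((a : Int) + 1) = (((a + 1 : Nat)) : Int) ∧ ((a : Int) + ((m + 1 : Nat) : Int)) = (((a + 1 : Nat)) : Int) + ((m : Nat) : Int) := by
      constructor <;> (push_cast; ring)
    rw [hInner, hrest.1, hrest.2]
    exact ih (a + 1) _ _ (by omega) hiter.1 hlenB hagree' j hj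

-- ===== VERDICT (by name: the statement is the Claim_ definition above) =====
theorem pvGet_replicate (k j : Nat) : pvGet (List.replicate k (0 : Int)) j = 0 := by
  unfold pvGet
  rw [PySem.List.pyGetD_natCast]
  simp only [List.getD_eq_getElem?_getD, List.getElem?_replicate]
  split <;> rfl

theorem colored_partition_count_py_spec : Claim_equal_colored_partition_count_py := by
  intro h_ n_colors _hdom
  unfold Spec_colored_partition_count_py colored_partition_count_py colored_partition_count_py_alt
  by_cases hneg : h_ < 0
  · rw [if_pos hneg, if_pos hneg]
  · by_cases hzero : h_ = 0
    · rw [if_neg hneg, if_pos hzero, if_neg hneg, if_pos hzero]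
    · rw [if_neg hneg, if_neg hzero, if_neg hneg, if_neg hzero]
      obtain ⟨h, rfl⟩ : ∃ h : Nat, h_ = (h : Int) := ⟨h_.toNat, (Int.toNat_of_nonneg (by omega)).symm⟩
      have hh1 : 1 ≤ h := by omega
      have hrep : ((h : Int) + 1).toNat = h + 1 := by omega
      by_cases hcneg : n_colors ≤ 0
      · rw [if_pos hcneg]
        simp only [PySem.List.pyRange_one_eq_nil hcneg, List.foldl_nil]
        rw [PySem.List.foldl_ignore, hrep]
        have : PySem.List.pyGetD ((List.replicate (h + 1) (0 : Int)).set 0 1) ((h : Nat) : Int) 0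
            = pvGet ((List.replicate (h + 1) (0 : Int)).set 0 1) h := rfl
        rw [this, pvGet_set_ne _ _ _ _ (by omega), pvGet_replicate]
      · rw [if_neg hcneg]
        obtain ⟨c, rfl⟩ : ∃ c : Nat, n_colors = (c : Int) := ⟨n_colors.toNat, (Int.toNat_of_nonneg (by omega)).symm⟩
        have hc1 : 0 < c := by omega
        have hrep2 : ((h : Int)).toNat = h := by omega
        rw [hrep, hrep2]
        have hlenA : ((List.replicate (h + 1) (0 : Int)).set 0 1).length = h + 1 := by simp
        have hlenB : ((1 : Int) :: List.replicate h (0 : Int)).length = h + 1 := by simp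
        have hagree : ∀ j ≤ h,
            pvGet ((List.replicate (h + 1) (0 : Int)).set 0 1) j
            = pvGet ((1 : Int) :: List.replicate h (0 : Int)) j := by
          intro j hj
          rcases Nat.eq_zero_or_pos j with rfl | hjpos
          · rw [pvGet_set_self _ _ _ (by simp)]
            unfold pvGet
            rw [PySem.List.pyGetD_natCast]
            rfl
          · rw [pvGet_set_ne _ _ _ _ (by omega), pvGet_replicate]
            unfold pvGet
            rw [PySem.List.pyGetD_natCast]
            rcases j with _ | j
            · omega
            · rw [List.getD_eq_getElem?_getD, List.getElem?_cons_succ, List.getElem?_replicate]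
              split <;> rfl
        have hOuter := pvOuter h c hc1 h 1 ((List.replicate (h + 1) (0 : Int)).set 0 1)
          ((1 : Int) :: List.replicate h (0 : Int)) (by omega) hlenA hlenB hagree
        rw [show ((1 : Nat) : Int) + ((h : Nat) : Int) = ((h : Int) + 1) from by push_cast; ring] at hOuter
        rw [Nat.cast_one] at hOuter
        exact hOuter h le_rfl
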